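-- pv_equiv track=rewrite | github.com/lun-ai/sequential-teaching | data/analysis/eval_trace.py | vectorise_trace
-- ===== SOURCE A (Python) =====
-- def vectorise_trace(machine_trace, human_trace, labels):
--     vm = {}
--     vh = {}
--     for l1 in labels:
--         for l2 in labels:
--             # a new comparison pair
--             if not (str(l1 + ',' + l2) in vm or str(l1 + ',' + l2) in vh) and not (
--                     str(l2 + ',' + l1) in vm or str(l2 + ',' + l1) in vh):
--                 vm[l1 + ',' + l2] = 0
--                 vh[l1 + ',' + l2] = 0
--                 # mark occurrence of label pairs
--                 if [l1, l2] in machine_trace or [l2, l1] in machine_trace: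
--                     vm[l1 + ',' + l2] = 1
--                 if [l1, l2] in human_trace or [l2, l1] in human_trace:
--                     vh[l1 + ',' + l2] = 1
--     for v in list(vm.values()):
--         if v > 1:
--             raise ValueError("Occurrence of a set should not be greater than 1!")
--     return vm, vh
-- ===== SOURCE B (Python) =====
-- def vectorise_trace(machine_trace, human_trace, labels):
--     distinct = list(dict.fromkeys(labels))
--     pos = {l: i for i, l in enumerate(distinct)}
--
--     def canon_pairs(trace):
--         s = set()
--         for e in trace:
--             if len(e) == 2 and e[0] in pos and e[1] in pos:
--                 a, b = e
--                 s.add((a, b) if pos[a] <= pos[b] else (b, a))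
--         return s
--
--     ms = canon_pairs(machine_trace)
--     hs = canon_pairs(human_trace)
--     vm = {}
--     vh = {}
--     for i, p in enumerate(distinct):
--         for q in distinct[i:]:
--             k = p + ',' + q
--             vm[k] = 1 if (p, q) in ms else 0
--             vh[k] = 1 if (p, q) in hs else 0
--     return vm, vh
-- ===== Notes on version B (the rewrite author's own statement) =====
-- stated objective: alternative
-- what changed: Instead of scanning all n^2 ordered label pairs with dict-membership dedup and per-pair trace scans, B dedups the labels once, builds a set of canonically ordered pairs in a single pass over each trace, and fills both dicts with one triangular pass over the distinct labels using set lookups; A's dead values>1 check is dropped as a provable no-op.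
import Mathlib
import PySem

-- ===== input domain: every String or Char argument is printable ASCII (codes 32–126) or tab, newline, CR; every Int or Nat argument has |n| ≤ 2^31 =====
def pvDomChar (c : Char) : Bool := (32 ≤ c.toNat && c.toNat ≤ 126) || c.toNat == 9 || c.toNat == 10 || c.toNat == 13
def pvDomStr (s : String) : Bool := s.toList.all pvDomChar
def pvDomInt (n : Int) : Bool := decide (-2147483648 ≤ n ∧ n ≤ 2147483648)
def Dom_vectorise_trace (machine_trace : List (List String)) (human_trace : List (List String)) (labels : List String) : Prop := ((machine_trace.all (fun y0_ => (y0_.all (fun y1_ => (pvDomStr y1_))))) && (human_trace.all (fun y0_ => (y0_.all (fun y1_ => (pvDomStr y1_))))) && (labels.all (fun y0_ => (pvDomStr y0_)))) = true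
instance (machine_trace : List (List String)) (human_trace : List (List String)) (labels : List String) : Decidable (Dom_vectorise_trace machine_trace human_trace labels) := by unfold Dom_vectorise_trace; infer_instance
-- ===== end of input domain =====

-- B re-implements A with a different algorithm: dedup the labels once, build a canonical-pair set in a
-- single pass over each trace, then fill both dicts with one triangular pass (A's dead values>1 check is a provable no-op and is dropped).


-- ===== PORT A =====
-- the body of A's inner `for l2 in labels:` loop, named so the proofs can speak about it
def pvAStep (machine_trace : List (List String)) (human_trace : List (List String)) (l1 : String)
    (st : PySem.Dict String Int × PySem.Dict String Int) (l2 : String) :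
    PySem.Dict String Int × PySem.Dict String Int :=
  if !(st.1.contains (l1 ++ "," ++ l2) || st.2.contains (l1 ++ "," ++ l2))
      && !(st.1.contains (l2 ++ "," ++ l1) || st.2.contains (l2 ++ "," ++ l1)) then
    let vm := st.1.insert (l1 ++ "," ++ l2) 0
    let vh := st.2.insert (l1 ++ "," ++ l2) 0
    let vm := if [l1, l2] ∈ machine_trace ∨ [l2, l1] ∈ machine_trace then vm.insert (l1 ++ "," ++ l2) 1 else vm
    let vh := if [l1, l2] ∈ human_trace ∨ [l2, l1] ∈ human_trace then vh.insert (l1 ++ "," ++ l2) 1 else vh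
    (vm, vh)
  else st

def vectorise_trace (machine_trace : List (List String)) (human_trace : List (List String)) (labels : List String) : (List (String × Int)) × (List (String × Int)) :=
  let st := labels.foldl
    (fun st l1 => labels.foldl (pvAStep machine_trace human_trace l1) st)
    (PySem.Dict.empty, PySem.Dict.empty)
  -- A's final `for v in list(vm.values()): if v > 1: raise` loop: every stored value is 0 or 1,
  -- so it never raises and has no other effect; ported as a no-op
  (st.1.items, st.2.items)

-- ===== PORT B =====
-- Source B's inner helper canon_pairs(trace) (pos is the enclosing-scope dict)
def pvCanonPairs (pos : PySem.Dict String Int) (trace : List (List String)) : PySem.Set (String × String) :=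
  trace.foldl
    (fun s e =>
      match e with
      | [a, b] =>
        if pos.contains a && pos.contains b then
          PySem.Set.add s (if pos.getD a 0 ≤ pos.getD b 0 then (a, b) else (b, a))
        else s
      | _ => s)
    PySem.Set.empty

-- the body of Source B's inner `for q in distinct[i:]:` loop
def pvBStep (ms hs : PySem.Set (String × String)) (p : String)
    (st : PySem.Dict String Int × PySem.Dict String Int) (q : String) :
    PySem.Dict String Int × PySem.Dict String Int :=
  (st.1.insert (p ++ "," ++ q) (if PySem.Set.contains ms (p, q) then 1 else 0),
   st.2.insert (p ++ "," ++ q) (if PySem.Set.contains hs (p, q) then 1 else 0))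

def vectorise_trace_alt (machine_trace : List (List String)) (human_trace : List (List String)) (labels : List String) : (List (String × Int)) × (List (String × Int)) :=
  let distinct := PySem.List.dedup labels
  let pos : PySem.Dict String Int := PySem.Dict.ofList ((PySem.List.enumerate distinct).map (fun il => (il.2, il.1)))
  let ms := pvCanonPairs pos machine_trace
  let hs := pvCanonPairs pos human_trace
  let st := (PySem.List.enumerate distinct).foldl
    (fun st ip => (PySem.List.slice distinct (some ip.1) none).foldl (pvBStep ms hs ip.2) st)
    (PySem.Dict.empty, PySem.Dict.empty)
  (st.1.items, st.2.items)

-- ===== PRECONDITION & SPEC =====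
-- Pre_ excludes label lists on which two DIFFERENT ordered label pairs produce the same 'p,q' key
-- string (only possible when labels contain commas): there A's string-keyed dict conflates distinct
-- pairs — an accidental artefact of the key encoding.
def Pre_vectorise_trace (machine_trace : List (List String)) (human_trace : List (List String)) (labels : List String) : Prop :=
  ∀ a ∈ labels, ∀ b ∈ labels, ∀ c ∈ labels, ∀ d ∈ labels,
    a ++ "," ++ b = c ++ "," ++ d → a = c ∧ b = d
instance (machine_trace : List (List String)) (human_trace : List (List String)) (labels : List String) : Decidable (Pre_vectorise_trace machine_trace human_trace labels) := by unfold Pre_vectorise_trace; infer_instance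

def pvWitness_vectorise_trace : List (List String) × List (List String) × List String :=
  ([["x", "y"]], [["y", "x"], ["x"]], ["x", "y", "x"])

def Spec_vectorise_trace (machine_trace : List (List String)) (human_trace : List (List String)) (labels : List String) (out : (List (String × Int)) × (List (String × Int))) : Prop := out = vectorise_trace_alt machine_trace human_trace labels
instance (machine_trace : List (List String)) (human_trace : List (List String)) (labels : List String) (out : (List (String × Int)) × (List (String × Int))) : Decidable (Spec_vectorise_trace machine_trace human_trace labels out) := by unfold Spec_vectorise_trace; infer_instance

-- ===== CLAIM (what is proved, stated in full; the proofs are below) =====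
def Claim_equal_vectorise_trace : Prop := ∀ (machine_trace : List (List String)) (human_trace : List (List String)) (labels : List String), Dom_vectorise_trace machine_trace human_trace labels → Pre_vectorise_trace machine_trace human_trace labels → Spec_vectorise_trace machine_trace human_trace labels (vectorise_trace machine_trace human_trace labels)

-- ===== LEMMAS AND PROOFS =====

def pvDF (S : List String) : List String → List String
  | [] => []
  | q :: Q => if q ∈ S then pvDF S Q else q :: pvDF (S ++ [q]) Q

theorem pvDF_foldl_add (Q S : List String) :
    List.foldl PySem.Set.add S Q = S ++ pvDF S Q := by
  induction Q generalizing S with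
  | nil => simp [pvDF]
  | cons q Q ih =>
    simp only [List.foldl_cons, pvDF]
    by_cases h : q ∈ S
    · rw [show PySem.Set.add S q = S from by simp [PySem.Set.add, PySem.Set.contains, h], ih, if_pos h]
    · rw [show PySem.Set.add S q = S ++ [q] from by simp [PySem.Set.add, PySem.Set.contains, h], ih, if_neg h]
      simp

theorem pvDedup_eq_pvDF (Q : List String) : PySem.List.dedup Q = pvDF [] Q := by
  have := pvDF_foldl_add Q []
  simpa [PySem.List.dedup, PySem.Set.ofList, PySem.Set.empty] using this

theorem pvMem_pvDF (Q : List String) : ∀ (S : List String) (b : String),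
    b ∈ pvDF S Q ↔ b ∈ Q ∧ b ∉ S := by
  induction Q with
  | nil => simp [pvDF]
  | cons q Q ih =>
    intro S b
    simp only [pvDF]
    by_cases h : q ∈ S
    · rw [if_pos h, ih]
      constructor
      · rintro ⟨h1, h2⟩; exact ⟨List.mem_cons_of_mem _ h1, h2⟩
      · rintro ⟨h1, h2⟩
        rcases List.mem_cons.mp h1 with rfl | h1
        · exact absurd h h2
        · exact ⟨h1, h2⟩
    · rw [if_neg h]
      simp only [List.mem_cons, ih, List.mem_append, List.mem_singleton]
      constructor
      · rintro (rfl | ⟨h1, h2⟩)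
        · exact ⟨Or.inl rfl, h⟩
        · exact ⟨Or.inr h1, fun hb => h2 (Or.inl hb)⟩
      · rintro ⟨h1, h2⟩
        by_cases hbq : b = q
        · exact Or.inl hbq
        · rcases h1 with rfl | h1
          · exact Or.inl rfl
          · refine Or.inr ⟨h1, fun hb => ?_⟩
            rcases hb with hb | hb
            · exact h2 hb
            · exact hbq (by simpa using hb)

theorem pvDF_append (X : List String) : ∀ (Y S : List String),
    pvDF S (X ++ Y) = pvDF S X ++ pvDF (S ++ pvDF S X) Y := by
  induction X with
  | nil => intro Y S; simp [pvDF]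
  | cons x X ih =>
    intro Y S
    simp only [List.cons_append, pvDF]
    by_cases h : x ∈ S
    · rw [if_pos h, if_pos h, ih]
    · rw [if_neg h, if_neg h, ih]
      simp

theorem pvDF_nil_of_sub (X : List String) (S : List String) (h : ∀ x ∈ X, x ∈ S) :
    pvDF S X = [] := by
  induction X with
  | nil => rfl
  | cons x X ih => rw [pvDF, if_pos (h x (by simp))]; exact ih fun y hy => h y (by simp [hy])

theorem pvNodup_pvDF (Q : List String) : ∀ (S : List String), (pvDF S Q).Nodup := by
  induction Q with
  | nil => intro S; simp [pvDF]
  | cons q Q ih =>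
    intro S
    rw [pvDF]
    by_cases h : q ∈ S
    · rw [if_pos h]; exact ih S
    · rw [if_neg h]
      refine List.nodup_cons.mpr ⟨fun hq => ?_, ih _⟩
      exact ((pvMem_pvDF Q _ q).mp hq).2 (by simp)

def pvKey (a b : String) : String := a ++ "," ++ b

def pvMark (t : List (List String)) (pq : String × String) : Int :=
  if [pq.1, pq.2] ∈ t ∨ [pq.2, pq.1] ∈ t then 1 else 0

def pvItems (t : List (List String)) (E : List (String × String)) : List (String × Int) :=
  E.map (fun pq => (pvKey pq.1 pq.2, pvMark t pq))

theorem pvContains_pvItems {ls : List String}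
    (hinj : ∀ a ∈ ls, ∀ b ∈ ls, ∀ c ∈ ls, ∀ d ∈ ls, a ++ "," ++ b = c ++ "," ++ d → a = c ∧ b = d)
    (t : List (List String)) (E : List (String × String))
    (hE : ∀ pq ∈ E, pq.1 ∈ ls ∧ pq.2 ∈ ls)
    {a b : String} (ha : a ∈ ls) (hb : b ∈ ls) :
    (PySem.Dict.mk (pvItems t E)).contains (pvKey a b) = decide ((a, b) ∈ E) := by
  by_cases hmem : (a, b) ∈ E
  · simp only [hmem, decide_true, PySem.Dict.contains_mk]
    exact List.any_eq_true.mpr ⟨(pvKey a b, pvMark t (a, b)), List.mem_map_of_mem hmem, by simp⟩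
  · simp only [hmem, decide_false, PySem.Dict.contains_mk]
    rw [← Bool.not_eq_true, List.any_eq_true]
    rintro ⟨p, hp, hbeq⟩
    obtain ⟨pq, hpq, rfl⟩ := List.mem_map.mp hp
    have hkey : pvKey pq.1 pq.2 = pvKey a b := by simpa using hbeq
    simp only [pvKey] at hkey
    obtain ⟨h1, h2⟩ := hinj _ (hE pq hpq).1 _ (hE pq hpq).2 _ ha _ hb hkey
    exact hmem (by obtain ⟨x, y⟩ := pq; simp_all)

theorem pvInsert_fresh {d : PySem.Dict String Int} {k : String} (h : d.contains k = false) (v : Int) :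
    d.insert k v = PySem.Dict.mk (d.items ++ [(k, v)]) := by
  simp [PySem.Dict.insert, h]

theorem pvInsert_overwrite_last (I : List (String × Int)) (k : String) (v0 v : Int)
    (h : (PySem.Dict.mk I).contains k = false) :
    (PySem.Dict.mk (I ++ [(k, v0)])).insert k v = PySem.Dict.mk (I ++ [(k, v)]) := by
  have hc : (PySem.Dict.mk (I ++ [(k, v0)])).contains k = true := by
    simp [PySem.Dict.contains_mk]
  simp only [PySem.Dict.insert, hc, if_true]
  congr 1
  rw [List.map_append]
  congr 1
  · conv_rhs => rw [← List.map_id I]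
    apply List.map_congr_left
    intro p hp
    have hfalse : (p.1 == k) = false := by
      rw [PySem.Dict.contains_mk] at h
      have := List.any_eq_false.mp h p hp
      simpa using this
    simp [hfalse]
  · simp

def pvTri : List String → List (String × String)
  | [] => []
  | p :: r => (p :: r).map (fun q => (p, q)) ++ pvTri r

def pvPairD (mt ht : List (List String)) (E : List (String × String)) :
    PySem.Dict String Int × PySem.Dict String Int :=
  (PySem.Dict.mk (pvItems mt E), PySem.Dict.mk (pvItems ht E))

theorem pvAStep_eq {ls : List String} (mt ht : List (List String))
    (hinj : ∀ a ∈ ls, ∀ b ∈ ls, ∀ c ∈ ls, ∀ d ∈ ls, a ++ "," ++ b = c ++ "," ++ d → a = c ∧ b = d)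
    (E : List (String × String)) (hE : ∀ pq ∈ E, pq.1 ∈ ls ∧ pq.2 ∈ ls)
    {p q : String} (hp : p ∈ ls) (hq : q ∈ ls) :
    pvAStep mt ht p (pvPairD mt ht E) q =
      if (p, q) ∈ E ∨ (q, p) ∈ E then pvPairD mt ht E
      else pvPairD mt ht (E ++ [(p, q)]) := by
  have c1 := pvContains_pvItems hinj mt E hE hp hq
  have c2 := pvContains_pvItems hinj ht E hE hp hq
  have c3 := pvContains_pvItems hinj mt E hE hq hp
  have c4 := pvContains_pvItems hinj ht E hE hq hp
  simp only [pvKey] at c1 c2 c3 c4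
  by_cases hm : (p, q) ∈ E ∨ (q, p) ∈ E
  · rw [if_pos hm]
    simp only [pvAStep, pvPairD] at c1 c2 c3 c4 ⊢
    rcases hm with hm | hm
    · simp [c1, c2, hm]
    · simp [c3, c4, hm]
  · rw [if_neg hm]
    push Not at hm
    obtain ⟨hm1, hm2⟩ := hm
    simp only [pvAStep, pvPairD] at c1 c2 c3 c4 ⊢
    rw [c1, c2, c3, c4]
    simp only [hm1, hm2, decide_false, Bool.or_false, Bool.not_false, Bool.and_self, if_true]
    have hfresh1 : (PySem.Dict.mk (pvItems mt E)).contains (p ++ "," ++ q) = false := by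
      rw [c1]; simp [hm1]
    have hfresh2 : (PySem.Dict.mk (pvItems ht E)).contains (p ++ "," ++ q) = false := by
      rw [c2]; simp [hm1]
    rw [pvInsert_fresh hfresh1, pvInsert_fresh hfresh2]
    have hitems : ∀ t : List (List String), pvItems t (E ++ [(p, q)]) =
        pvItems t E ++ [(p ++ "," ++ q, pvMark t (p, q))] := by
      intro t; simp [pvItems, pvKey]
    rw [hitems, hitems, Prod.mk.injEq]
    constructor
    · by_cases hmem : [p, q] ∈ mt ∨ [q, p] ∈ mt
      · rw [if_pos hmem, pvInsert_overwrite_last _ _ _ _ hfresh1]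
        simp [pvMark, hmem]
      · rw [if_neg hmem]
        simp [pvMark, hmem]
    · by_cases hmem : [p, q] ∈ ht ∨ [q, p] ∈ ht
      · rw [if_pos hmem, pvInsert_overwrite_last _ _ _ _ hfresh2]
        simp [pvMark, hmem]
      · rw [if_neg hmem]
        simp [pvMark, hmem]

theorem pvA_inner {ls : List String} (mt ht : List (List String))
    (hinj : ∀ a ∈ ls, ∀ b ∈ ls, ∀ c ∈ ls, ∀ d ∈ ls, a ++ "," ++ b = c ++ "," ++ d → a = c ∧ b = d)
    (excl : List String) (E0 : List (String × String))
    (hE0 : ∀ pq ∈ E0, pq.1 ∈ ls ∧ pq.2 ∈ ls)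
    (p : String) (hp : p ∈ ls) (hpx : p ∉ excl)
    (hiff0 : ∀ a b, a ∈ ls → b ∈ ls → (((a, b) ∈ E0 ∨ (b, a) ∈ E0) ↔ (a ∈ excl ∨ b ∈ excl))) :
    ∀ (Q : List String), (∀ x ∈ Q, x ∈ ls) → ∀ (F : List String),
      (∀ x ∈ F, x ∈ ls) → (∀ x ∈ F, x ∉ excl) →
      Q.foldl (pvAStep mt ht p) (pvPairD mt ht (E0 ++ F.map (fun q => (p, q)))) =
        pvPairD mt ht (E0 ++ (F ++ pvDF (excl ++ F) Q).map (fun q => (p, q))) := by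
  intro Q
  induction Q with
  | nil => intro _ F _ _; simp [pvDF]
  | cons q Q ih =>
    intro hQ F hF hFx
    have hq : q ∈ ls := hQ q (by simp)
    have hE : ∀ pq ∈ E0 ++ F.map (fun q => (p, q)), pq.1 ∈ ls ∧ pq.2 ∈ ls := by
      intro pq hpq
      rcases List.mem_append.mp hpq with h | h
      · exact hE0 pq h
      · obtain ⟨x, hx, rfl⟩ := List.mem_map.mp h
        exact ⟨hp, hF x hx⟩
    rw [List.foldl_cons, pvAStep_eq mt ht hinj _ hE hp hq]
    have hmemE : ((p, q) ∈ E0 ++ F.map (fun q => (p, q)) ∨ (q, p) ∈ E0 ++ F.map (fun q => (p, q)))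
        ↔ (q ∈ excl ∨ q ∈ F) := by
      constructor
      · rintro (h | h)
        · rcases List.mem_append.mp h with h | h
          · rcases (hiff0 p q hp hq).mp (Or.inl h) with h' | h'
            · exact absurd h' hpx
            · exact Or.inl h'
          · obtain ⟨x, hx, hx2⟩ := List.mem_map.mp h
            have : x = q := by simpa using hx2
            exact Or.inr (this ▸ hx)
        · rcases List.mem_append.mp h with h | h
          · rcases (hiff0 q p hq hp).mp (Or.inl h) with h' | h'
            · exact Or.inl h'
            · exact absurd h' hpx
          · obtain ⟨x, hx, hx2⟩ := List.mem_map.mp h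
            simp only [Prod.mk.injEq] at hx2
            have h1 : q = p := hx2.1.symm
            have h2 : x = p := hx2.2
            exact Or.inr (by rw [h1, ← h2]; exact hx)
      · rintro (h | h)
        · rcases (hiff0 p q hp hq).mpr (Or.inr h) with h' | h'
          · exact Or.inl (List.mem_append.mpr (Or.inl h'))
          · exact Or.inr (List.mem_append.mpr (Or.inl h'))
        · exact Or.inl (List.mem_append.mpr (Or.inr (List.mem_map.mpr ⟨q, h, rfl⟩)))
    by_cases hcase : q ∈ excl ∨ q ∈ F
    · rw [if_pos (hmemE.mpr hcase)]
      have : pvDF (excl ++ F) (q :: Q) = pvDF (excl ++ F) Q := by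
        rw [pvDF, if_pos (List.mem_append.mpr hcase)]
      rw [this]
      exact ih (fun x hx => hQ x (by simp [hx])) F hF hFx
    · rw [if_neg (fun hx => hcase (hmemE.mp hx))]
      push Not at hcase
      have heq : E0 ++ F.map (fun q => (p, q)) ++ [(p, q)]
          = E0 ++ (F ++ [q]).map (fun q => (p, q)) := by simp
      rw [heq]
      have ihres := ih (fun x hx => hQ x (by simp [hx])) (F ++ [q])
        (fun x hx => by rcases List.mem_append.mp hx with h | h
                        · exact hF x h
                        · simp at h; exact h ▸ hq)
        (fun x hx => by rcases List.mem_append.mp hx with h | h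
                        · exact hFx x h
                        · simp at h; exact h ▸ hcase.1)
      rw [ihres]
      have : pvDF (excl ++ F) (q :: Q) = q :: pvDF (excl ++ F ++ [q]) Q := by
        rw [pvDF, if_neg (by simp [hcase.1, hcase.2]), List.append_assoc]
      rw [this]
      simp

theorem pvA_inner_skip {ls : List String} (mt ht : List (List String))
    (hinj : ∀ a ∈ ls, ∀ b ∈ ls, ∀ c ∈ ls, ∀ d ∈ ls, a ++ "," ++ b = c ++ "," ++ d → a = c ∧ b = d)
    (excl : List String) (E0 : List (String × String))
    (hE0 : ∀ pq ∈ E0, pq.1 ∈ ls ∧ pq.2 ∈ ls)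
    (p : String) (hp : p ∈ ls) (hpx : p ∈ excl)
    (hiff0 : ∀ a b, a ∈ ls → b ∈ ls → (((a, b) ∈ E0 ∨ (b, a) ∈ E0) ↔ (a ∈ excl ∨ b ∈ excl))) :
    ∀ (Q : List String), (∀ x ∈ Q, x ∈ ls) →
      Q.foldl (pvAStep mt ht p) (pvPairD mt ht E0) = pvPairD mt ht E0 := by
  intro Q
  induction Q with
  | nil => intro _; rfl
  | cons q Q ih =>
    intro hQ
    have hq : q ∈ ls := hQ q (by simp)
    rw [List.foldl_cons, pvAStep_eq mt ht hinj _ hE0 hp hq,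
      if_pos ((hiff0 p q hp hq).mpr (Or.inl hpx))]
    exact ih (fun x hx => hQ x (by simp [hx]))

theorem pvA_outer {ls : List String} (mt ht : List (List String))
    (hinj : ∀ a ∈ ls, ∀ b ∈ ls, ∀ c ∈ ls, ∀ d ∈ ls, a ++ "," ++ b = c ++ "," ++ d → a = c ∧ b = d) :
    ∀ (L P : List String), ls = P ++ L → ∀ (E0 : List (String × String)),
      (∀ pq ∈ E0, pq.1 ∈ ls ∧ pq.2 ∈ ls) →
      (∀ a b, a ∈ ls → b ∈ ls → (((a, b) ∈ E0 ∨ (b, a) ∈ E0) ↔ (a ∈ pvDF [] P ∨ b ∈ pvDF [] P))) →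
      L.foldl (fun st l1 => ls.foldl (pvAStep mt ht l1) st) (pvPairD mt ht E0) =
        pvPairD mt ht (E0 ++ pvTri (pvDF (pvDF [] P) L)) := by
  intro L
  induction L with
  | nil => intro P _ E0 _ _; simp [pvDF, pvTri]
  | cons p L' ih =>
    intro P hls E0 hE0 hiff
    have hp : p ∈ ls := by rw [hls]; simp
    have hPsub : ∀ x ∈ P, x ∈ pvDF [] P := by
      intro x hx; exact (pvMem_pvDF P [] x).mpr ⟨hx, by simp⟩
    rw [List.foldl_cons]
    by_cases hpe : p ∈ pvDF [] P
    · rw [pvA_inner_skip mt ht hinj _ E0 hE0 p hp hpe hiff ls (fun x hx => hx)]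
      have hPp : pvDF [] (P ++ [p]) = pvDF [] P := by
        rw [pvDF_append]
        simp only [List.nil_append]
        rw [show pvDF (pvDF [] P) [p] = [] from by simp [pvDF, hpe]]
        simp
      have := ih (P ++ [p]) (by rw [hls]; simp) E0 hE0 (by rw [hPp]; exact hiff)
      rw [this, hPp]
      have : pvDF (pvDF [] P) (p :: L') = pvDF (pvDF [] P) L' := by rw [pvDF, if_pos hpe]
      rw [this]
    · -- p is a new label
      set excl := pvDF [] P with hexcl
      have hR0 : pvDF excl ls = p :: pvDF (excl ++ [p]) L' := by
        rw [hls, pvDF_append, pvDF_nil_of_sub P excl hPsub]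
        simp only [List.nil_append, List.append_nil]
        rw [pvDF, if_neg hpe]
      have hinner := pvA_inner mt ht hinj excl E0 hE0 p hp hpe hiff ls (fun x hx => hx) []
        (by simp) (by simp)
      simp only [List.map_nil, List.append_nil, List.nil_append] at hinner
      rw [hinner]
      set R := pvDF (excl ++ [p]) L' with hRdef
      have hexcl' : pvDF [] (P ++ [p]) = excl ++ [p] := by
        rw [pvDF_append]
        simp only [List.nil_append, ← hexcl]
        rw [show pvDF excl [p] = [p] from by simp [pvDF, hpe]]
      have hRsub : ∀ x ∈ p :: R, x ∈ ls := by
        rw [← hR0]; intro x hx; exact ((pvMem_pvDF ls excl x).mp hx).1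
      have hE1 : ∀ pq ∈ E0 ++ (pvDF excl ls).map (fun q => (p, q)), pq.1 ∈ ls ∧ pq.2 ∈ ls := by
        intro pq hpq
        rcases List.mem_append.mp hpq with h | h
        · exact hE0 pq h
        · obtain ⟨x, hx, rfl⟩ := List.mem_map.mp h
          exact ⟨hp, ((pvMem_pvDF ls excl x).mp hx).1⟩
      have hiff' : ∀ a b, a ∈ ls → b ∈ ls →
          (((a, b) ∈ E0 ++ (pvDF excl ls).map (fun q => (p, q)) ∨
            (b, a) ∈ E0 ++ (pvDF excl ls).map (fun q => (p, q))) ↔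
           (a ∈ excl ++ [p] ∨ b ∈ excl ++ [p])) := by
        intro a b ha hb
        constructor
        · rintro (h | h) <;> rcases List.mem_append.mp h with h | h
          · rcases (hiff a b ha hb).mp (Or.inl h) with h' | h' <;> simp [h']
          · obtain ⟨x, hx, hx2⟩ := List.mem_map.mp h
            simp only [Prod.mk.injEq] at hx2
            simp [← hx2.1]
          · rcases (hiff b a hb ha).mp (Or.inl h) with h' | h' <;> simp [h']
          · obtain ⟨x, hx, hx2⟩ := List.mem_map.mp h
            simp only [Prod.mk.injEq] at hx2
            simp [← hx2.1]
        · intro h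
          have hnew : ∀ c, c ∈ ls → c ∉ excl → (p, c) ∈ (pvDF excl ls).map (fun q => (p, q)) := by
            intro c hc hcx
            exact List.mem_map.mpr ⟨c, (pvMem_pvDF ls excl c).mpr ⟨hc, hcx⟩, rfl⟩
          rcases h with h | h <;> rcases List.mem_append.mp h with h | h
          · rcases (hiff a b ha hb).mpr (Or.inl h) with h' | h'
            · exact Or.inl (List.mem_append.mpr (Or.inl h'))
            · exact Or.inr (List.mem_append.mpr (Or.inl h'))
          · -- a = p
            have ha' : a = p := by simpa using h
            subst ha'
            by_cases hbx : b ∈ excl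
            · rcases (hiff a b ha hb).mpr (Or.inr hbx) with h' | h'
              · exact Or.inl (List.mem_append.mpr (Or.inl h'))
              · exact Or.inr (List.mem_append.mpr (Or.inl h'))
            · exact Or.inl (List.mem_append.mpr (Or.inr (hnew b hb hbx)))
          · rcases (hiff a b ha hb).mpr (Or.inr h) with h' | h'
            · exact Or.inl (List.mem_append.mpr (Or.inl h'))
            · exact Or.inr (List.mem_append.mpr (Or.inl h'))
          · -- b = p
            have hb' : b = p := by simpa using h
            subst hb'
            by_cases hax : a ∈ excl
            · rcases (hiff a b ha hb).mpr (Or.inl hax) with h' | h'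
              · exact Or.inl (List.mem_append.mpr (Or.inl h'))
              · exact Or.inr (List.mem_append.mpr (Or.inl h'))
            · exact Or.inr (List.mem_append.mpr (Or.inr (hnew a ha hax)))
      have ihres := ih (P ++ [p]) (by rw [hls]; simp) _ hE1 (by rw [hexcl']; exact hiff')
      rw [ihres, hexcl']
      have hsplit : pvDF excl (p :: L') = p :: R := by rw [pvDF, if_neg hpe]
      have hgoal : pvDF excl ls = p :: R := hR0
      rw [hgoal]
      show pvPairD mt ht (E0 ++ (p :: R).map (fun q => (p, q)) ++ pvTri R) = _
      rw [hsplit]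
      show _ = pvPairD mt ht (E0 ++ ((p :: R).map (fun q => (p, q)) ++ pvTri R))
      rw [List.append_assoc]

theorem pvA_result (mt ht : List (List String)) (ls : List String)
    (hinj : ∀ a ∈ ls, ∀ b ∈ ls, ∀ c ∈ ls, ∀ d ∈ ls, a ++ "," ++ b = c ++ "," ++ d → a = c ∧ b = d) :
    vectorise_trace mt ht ls =
      (pvItems mt (pvTri (PySem.List.dedup ls)), pvItems ht (pvTri (PySem.List.dedup ls))) := by
  have hstart : (PySem.Dict.empty, PySem.Dict.empty) = pvPairD mt ht [] := by
    simp [pvPairD, pvItems, PySem.Dict.empty]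
  have h := pvA_outer mt ht hinj ls [] rfl []
    (by simp)
    (by intro a b _ _; simp [pvDF])
  simp only [pvDF] at h
  rw [show pvDF ([] : List String) = pvDF [] from rfl] at h
  unfold vectorise_trace
  rw [hstart, h, pvDedup_eq_pvDF]
  simp [pvPairD]

theorem pvGet?_posFold (D : List String) : ∀ (hD : D.Nodup) (start : Int) (d : PySem.Dict String Int)
    (hd : ∀ x ∈ D, d.get? x = none) (q : String),
    (List.foldl (fun acc p => acc.insert p.1 p.2) d
        ((PySem.List.enumerate D start).map (fun il => (il.2, il.1)))).get? q =
      if q ∈ D then some (start + (D.idxOf q : Int)) else d.get? q := by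
  induction D with
  | nil => intro _ start d _ q; simp [PySem.List.enumerate]
  | cons x D ih =>
    intro hD start d hd q
    rw [PySem.List.enumerate_cons]
    simp only [List.map_cons, List.foldl_cons]
    have hnd := List.nodup_cons.mp hD
    have hd' : ∀ y ∈ D, (d.insert x start).get? y = none := by
      intro y hy
      have hyx : y ≠ x := fun h => hnd.1 (h ▸ hy)
      rw [PySem.Dict.get?_insert_of_ne d start hyx]
      exact hd y (by simp [hy])
    rw [ih hnd.2 (start + 1) (d.insert x start) hd' q]
    by_cases hqD : q ∈ D
    · rw [if_pos hqD, if_pos (by simp [hqD])]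
      have hqx : q ≠ x := fun h => hnd.1 (h ▸ hqD)
      rw [List.idxOf_cons_ne _ (fun h => hqx h.symm)]
      congr 1
      push_cast
      ring
    · rw [if_neg hqD]
      by_cases hqx : q = x
      · subst hqx
        rw [if_pos (by simp), PySem.Dict.get?_insert_self, List.idxOf_cons_self]
        simp
      · rw [if_neg (by simp [hqx, hqD]), PySem.Dict.get?_insert_of_ne d start hqx]

def pvPos (D : List String) : PySem.Dict String Int :=
  PySem.Dict.ofList ((PySem.List.enumerate D).map (fun il => (il.2, il.1)))

theorem pvPos_get? (D : List String) (hD : D.Nodup) (q : String) :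
    (pvPos D).get? q = if q ∈ D then some ((D.idxOf q : Int)) else none := by
  unfold pvPos PySem.Dict.ofList PySem.Dict.update
  have h0 : ∀ x ∈ D, PySem.Dict.empty.get? x = (none : Option Int) := fun _ _ => rfl
  have := pvGet?_posFold D hD 0 PySem.Dict.empty h0 q
  simpa using this

theorem pvContains_eq_isSome (d : PySem.Dict String Int) (k : String) :
    d.contains k = (d.get? k).isSome := by
  unfold PySem.Dict.contains PySem.Dict.get?
  rw [Bool.eq_iff_iff]
  simp [List.any_eq_true, List.find?_isSome]

theorem pvPos_contains (D : List String) (hD : D.Nodup) (q : String) :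
    (pvPos D).contains q = decide (q ∈ D) := by
  rw [pvContains_eq_isSome, pvPos_get? D hD]
  by_cases h : q ∈ D <;> simp [h]

theorem pvPos_getD (D : List String) (hD : D.Nodup) {q : String} (hq : q ∈ D) :
    (pvPos D).getD q 0 = (D.idxOf q : Int) := by
  unfold PySem.Dict.getD
  rw [pvPos_get? D hD, if_pos hq]
  rfl

theorem pvIdxOf_inj {D : List String} (hD : D.Nodup) {p q : String} (hp : p ∈ D) (hq : q ∈ D)
    (h : D.idxOf p = D.idxOf q) : p = q := by
  have h1 : D[D.idxOf p]'(List.idxOf_lt_length_of_mem hp) = p := List.getElem_idxOf _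
  have h2 : D[D.idxOf q]'(List.idxOf_lt_length_of_mem hq) = q := List.getElem_idxOf _
  have h1' : D[D.idxOf p]? = some p := by
    rw [List.getElem?_eq_getElem (List.idxOf_lt_length_of_mem hp)]
    simp [List.getElem_idxOf]
  have h2' : D[D.idxOf q]? = some q := by
    rw [List.getElem?_eq_getElem (List.idxOf_lt_length_of_mem hq)]
    simp [List.getElem_idxOf]
  rw [h] at h1'
  exact Option.some.inj (h1'.symm.trans h2')

theorem pvMem_canonPairs (D : List String) (hD : D.Nodup) (t : List (List String))
    {p q : String} (hp : p ∈ D) (hq : q ∈ D) (hle : D.idxOf p ≤ D.idxOf q) :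
    ((p, q) ∈ pvCanonPairs (pvPos D) t) ↔ ([p, q] ∈ t ∨ [q, p] ∈ t) := by
  have main : ∀ (t : List (List String)) (s : PySem.Set (String × String)),
      ((p, q) ∈ t.foldl (fun s e =>
        match e with
        | [a, b] =>
          if (pvPos D).contains a && (pvPos D).contains b then
            PySem.Set.add s (if (pvPos D).getD a 0 ≤ (pvPos D).getD b 0 then (a, b) else (b, a))
          else s
        | _ => s) s) ↔ ((p, q) ∈ s ∨ ([p, q] ∈ t ∨ [q, p] ∈ t)) := by
    intro t
    induction t with
    | nil => intro s; simp
    | cons e t ih =>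
      intro s
      rw [List.foldl_cons]
      rcases e with _ | ⟨a, e⟩
      · rw [ih]; simp
      rcases e with _ | ⟨b, e⟩
      · show ((p, q) ∈ t.foldl _ s) ↔ _
        rw [ih]
        simp [List.mem_cons]
      rcases e with _ | ⟨c, e⟩
      swap
      · show ((p, q) ∈ t.foldl _ s) ↔ _
        rw [ih]
        simp only [List.mem_cons, List.cons.injEq]
        constructor
        · tauto
        · rintro (h | (h | h) | (h | h)) <;> tauto
      -- e = [a, b]
      show ((p, q) ∈ t.foldl _ (if (pvPos D).contains a && (pvPos D).contains b then _ else s)) ↔ _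
      by_cases hab : a ∈ D ∧ b ∈ D
      · rw [if_pos (by rw [pvPos_contains D hD, pvPos_contains D hD]; simp [hab.1, hab.2])]
        rw [ih, PySem.Set.mem_add]
        rw [pvPos_getD D hD hab.1, pvPos_getD D hD hab.2]
        have hc : ((p, q) = if (D.idxOf a : Int) ≤ (D.idxOf b : Int) then (a, b) else (b, a))
            ↔ ([a, b] = [p, q] ∨ [a, b] = [q, p]) := by
          constructor
          · intro h
            split at h <;> simp only [Prod.mk.injEq] at h <;> simp [h.1, h.2]
          · rintro (heq | heq) <;> injection heq with h1 h2 <;> injection h2 with h2 _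
            · rw [h1, h2, if_pos (by exact_mod_cast hle)]
            · by_cases hqa : (D.idxOf p : Nat) = D.idxOf q
              · have hpq : p = q := pvIdxOf_inj hD hp hq hqa
                rw [h1, h2, hpq]
                split <;> simp
              · rw [h1, h2, if_neg (by push Not; exact_mod_cast Nat.lt_of_le_of_ne hle hqa)]
        simp only [List.mem_cons]
        constructor
        · rintro ((h | h) | h)
          · exact Or.inl h
          · rcases hc.mp h with h | h
            · exact Or.inr (Or.inl (Or.inl h.symm))
            · exact Or.inr (Or.inr (Or.inl h.symm))
          · rcases h with h | h
            · exact Or.inr (Or.inl (Or.inr h))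
            · exact Or.inr (Or.inr (Or.inr h))
        · rintro (h | (h | h) | (h | h))
          · exact Or.inl (Or.inl h)
          · exact Or.inl (Or.inr (hc.mpr (Or.inl h.symm)))
          · exact Or.inr (Or.inl h)
          · exact Or.inl (Or.inr (hc.mpr (Or.inr h.symm)))
          · exact Or.inr (Or.inr h)
      · rw [if_neg (by
          rw [pvPos_contains D hD, pvPos_contains D hD]
          rcases (not_and_or.mp hab) with h | h <;> simp [h])]
        rw [ih]
        have hane : [a, b] ≠ [p, q] ∧ [a, b] ≠ [q, p] := by
          constructor <;> intro heq <;> injection heq with h1 h2 <;> injection h2 with h2 _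
          · exact hab ⟨by rw [h1]; exact hp, by rw [h2]; exact hq⟩
          · exact hab ⟨by rw [h1]; exact hq, by rw [h2]; exact hp⟩
        simp only [List.mem_cons]
        constructor
        · rintro (h | h)
          · exact Or.inl h
          · rcases h with h | h
            · exact Or.inr (Or.inl (Or.inr h))
            · exact Or.inr (Or.inr (Or.inr h))
        · rintro (h | (h | h) | (h | h))
          · exact Or.inl h
          · exact absurd h.symm hane.1
          · exact Or.inr (Or.inl h)
          · exact absurd h.symm hane.2
          · exact Or.inr (Or.inr h)
  have := main t PySem.Set.empty
  unfold pvCanonPairs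
  rw [this]
  simp [PySem.Set.empty]

theorem pvTri_mem {D : List String} (hD : D.Nodup) :
    ∀ pq ∈ pvTri D, pq.1 ∈ D ∧ pq.2 ∈ D ∧ D.idxOf pq.1 ≤ D.idxOf pq.2 := by
  induction D with
  | nil => intro pq h; simp [pvTri] at h
  | cons p r ih =>
    intro pq hpq
    have hnd := List.nodup_cons.mp hD
    rcases List.mem_append.mp hpq with h | h
    · obtain ⟨q, hq, rfl⟩ := List.mem_map.mp h
      exact ⟨by simp, hq, by simp [List.idxOf_cons_self]⟩
    · obtain ⟨h1, h2, h3⟩ := ih hnd.2 pq h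
      have hp1 : pq.1 ≠ p := fun he => hnd.1 (he ▸ h1)
      have hp2 : pq.2 ≠ p := fun he => hnd.1 (he ▸ h2)
      refine ⟨by simp [h1], by simp [h2], ?_⟩
      rw [List.idxOf_cons_ne _ (fun h => hp1 h.symm), List.idxOf_cons_ne _ (fun h => hp2 h.symm)]
      omega

theorem pvTri_keys_nodup {ls D : List String}
    (hinj : ∀ a ∈ ls, ∀ b ∈ ls, ∀ c ∈ ls, ∀ d ∈ ls, a ++ "," ++ b = c ++ "," ++ d → a = c ∧ b = d)
    (hD : D.Nodup) (hsub : ∀ x ∈ D, x ∈ ls) :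
    ((pvTri D).map (fun pq => pvKey pq.1 pq.2)).Nodup := by
  induction D with
  | nil => simp [pvTri]
  | cons p r ih =>
    have hnd := List.nodup_cons.mp hD
    have hp : p ∈ ls := hsub p (by simp)
    have hsub' : ∀ x ∈ r, x ∈ ls := fun x hx => hsub x (by simp [hx])
    rw [show pvTri (p :: r) = (p :: r).map (fun q => (p, q)) ++ pvTri r from rfl, List.map_append]
    rw [List.nodup_append]
    refine ⟨?_, ih hnd.2 hsub', ?_⟩
    · rw [List.map_map]
      refine List.Nodup.map_on ?_ hD
      intro x hx y hy hxy
      simp only [Function.comp] at hxy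
      exact (hinj p hp x (hsub x hx) p hp y (hsub y hy) hxy).2
    · intro k hk k' hk' he
      obtain ⟨q, hq, rfl⟩ := List.mem_map.mp hk
      obtain ⟨z, hz, rfl⟩ := List.mem_map.mp hq
      obtain ⟨pq, hpq, rfl⟩ := List.mem_map.mp hk'
      obtain ⟨h1, h2, _⟩ := pvTri_mem hnd.2 pq hpq
      have := hinj p hp z (hsub z hz) pq.1 (hsub' pq.1 h1) pq.2 (hsub' pq.2 h2)
        (by simpa [pvKey] using he)
      exact hnd.1 (this.1 ▸ h1)

theorem pvBfold_pairs (ms hs : PySem.Set (String × String)) :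
    ∀ (ps : List (String × String)) (E : List (String × String)),
      (((E ++ ps).map (fun pq => pvKey pq.1 pq.2)).Nodup) →
      ps.foldl (fun st pq => (st.1.insert (pvKey pq.1 pq.2) (if PySem.Set.contains ms pq then (1 : Int) else 0),
                              st.2.insert (pvKey pq.1 pq.2) (if PySem.Set.contains hs pq then (1 : Int) else 0)))
        (PySem.Dict.mk (E.map (fun pq => (pvKey pq.1 pq.2, if PySem.Set.contains ms pq then (1 : Int) else 0))),
         PySem.Dict.mk (E.map (fun pq => (pvKey pq.1 pq.2, if PySem.Set.contains hs pq then (1 : Int) else 0)))) =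
        (PySem.Dict.mk ((E ++ ps).map (fun pq => (pvKey pq.1 pq.2, if PySem.Set.contains ms pq then (1 : Int) else 0))),
         PySem.Dict.mk ((E ++ ps).map (fun pq => (pvKey pq.1 pq.2, if PySem.Set.contains hs pq then (1 : Int) else 0)))) := by
  intro ps
  induction ps with
  | nil => intro E _; simp
  | cons pq ps ih =>
    intro E hnd
    rw [List.foldl_cons]
    dsimp only
    have hfresh : ∀ (f : String × String → Int),
        (PySem.Dict.mk (E.map (fun pq => (pvKey pq.1 pq.2, f pq)))).contains (pvKey pq.1 pq.2) = false := by
      intro f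
      rw [PySem.Dict.contains_mk]
      rw [List.any_eq_false]
      intro x hx
      obtain ⟨pq', hpq', rfl⟩ := List.mem_map.mp hx
      have hnd' : ((E ++ [pq]).map (fun pq => pvKey pq.1 pq.2) ++ ps.map (fun pq => pvKey pq.1 pq.2)).Nodup := by
        rw [← List.map_append, show (E ++ [pq]) ++ ps = E ++ pq :: ps from by simp]
        exact hnd
      have h1 := (List.nodup_append.mp hnd').1
      rw [List.map_append] at h1
      have hne : pvKey pq'.1 pq'.2 ≠ pvKey pq.1 pq.2 :=
        (List.nodup_append.mp h1).2.2 _ (List.mem_map_of_mem hpq') _ (by simp)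
      simpa using hne
    rw [pvInsert_fresh (hfresh (fun pq => if PySem.Set.contains ms pq then (1 : Int) else 0)),
        pvInsert_fresh (hfresh (fun pq => if PySem.Set.contains hs pq then (1 : Int) else 0))]
    simp only
    have hEq : ∀ (f : String × String → Int),
        (PySem.Dict.mk (E.map (fun pq => (pvKey pq.1 pq.2, f pq)))).items ++ [(pvKey pq.1 pq.2, f pq)]
          = (E ++ [pq]).map (fun pq => (pvKey pq.1 pq.2, f pq)) := by
      intro f; simp
    rw [hEq, hEq]
    have := ih (E ++ [pq]) (by simpa using hnd)
    rw [this]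
    simp

theorem pvB_tri (ms hs : PySem.Set (String × String)) (D : List String) :
    ∀ (suf pre : List String), D = pre ++ suf → ∀ (E : List (String × String)),
      ((E ++ pvTri suf).map (fun pq => pvKey pq.1 pq.2)).Nodup →
      (PySem.List.enumerate suf ((pre.length : Nat) : Int)).foldl
        (fun st ip => (PySem.List.slice D (some ip.1) none).foldl (pvBStep ms hs ip.2) st)
        (PySem.Dict.mk (E.map (fun pq => (pvKey pq.1 pq.2, if PySem.Set.contains ms pq then (1 : Int) else 0))),
         PySem.Dict.mk (E.map (fun pq => (pvKey pq.1 pq.2, if PySem.Set.contains hs pq then (1 : Int) else 0)))) =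
        (PySem.Dict.mk ((E ++ pvTri suf).map (fun pq => (pvKey pq.1 pq.2, if PySem.Set.contains ms pq then (1 : Int) else 0))),
         PySem.Dict.mk ((E ++ pvTri suf).map (fun pq => (pvKey pq.1 pq.2, if PySem.Set.contains hs pq then (1 : Int) else 0)))) := by
  intro suf
  induction suf with
  | nil =>
    intro pre _ E _
    simp [PySem.List.enumerate, pvTri]
  | cons p rest ih =>
    intro pre hD E hnd
    rw [PySem.List.enumerate_cons, List.foldl_cons]
    have hslice : PySem.List.slice D (some ((pre.length : Nat) : Int)) none = p :: rest := by
      rw [PySem.List.slice_from_natCast, hD, List.drop_left]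
    rw [hslice]
    set ps : List (String × String) := (p :: rest).map (fun q => (p, q)) with hps
    have htri : pvTri (p :: rest) = ps ++ pvTri rest := rfl
    have hnd1 : ((E ++ ps).map (fun pq => pvKey pq.1 pq.2)).Nodup := by
      refine List.Nodup.sublist (List.Sublist.map _ ?_) hnd
      rw [htri, ← List.append_assoc]
      exact List.sublist_append_left _ _
    have hinner : (p :: rest).foldl (pvBStep ms hs p)
        (PySem.Dict.mk (E.map (fun pq => (pvKey pq.1 pq.2, if PySem.Set.contains ms pq then (1 : Int) else 0))),
         PySem.Dict.mk (E.map (fun pq => (pvKey pq.1 pq.2, if PySem.Set.contains hs pq then (1 : Int) else 0)))) =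
        (PySem.Dict.mk ((E ++ ps).map (fun pq => (pvKey pq.1 pq.2, if PySem.Set.contains ms pq then (1 : Int) else 0))),
         PySem.Dict.mk ((E ++ ps).map (fun pq => (pvKey pq.1 pq.2, if PySem.Set.contains hs pq then (1 : Int) else 0)))) := by
      have hmap : ∀ (init : PySem.Dict String Int × PySem.Dict String Int),
          ps.foldl (fun st pq =>
            (st.1.insert (pvKey pq.1 pq.2) (if PySem.Set.contains ms pq then (1 : Int) else 0),
             st.2.insert (pvKey pq.1 pq.2) (if PySem.Set.contains hs pq then (1 : Int) else 0))) init =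
          (p :: rest).foldl (pvBStep ms hs p) init := by
        intro init
        rw [hps, List.foldl_map]
        have hfun : (fun (st : PySem.Dict String Int × PySem.Dict String Int) (q : String) =>
            (st.1.insert (pvKey p q) (if PySem.Set.contains ms (p, q) then (1 : Int) else 0),
             st.2.insert (pvKey p q) (if PySem.Set.contains hs (p, q) then (1 : Int) else 0))) =
            pvBStep ms hs p := by
          funext st q
          simp [pvBStep, pvKey]
        rw [← hfun]
      rw [← hmap]
      exact pvBfold_pairs ms hs ps E hnd1
    rw [hinner]
    have hstart : ((pre.length : Nat) : Int) + 1 = (((pre ++ [p]).length : Nat) : Int) := by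
      simp
    rw [hstart]
    have := ih (pre ++ [p]) (by rw [hD]; simp) (E ++ ps)
      (by rw [List.append_assoc, ← htri]; exact hnd)
    rw [this, List.append_assoc, ← htri]

theorem pvB_result (mt ht : List (List String)) (ls : List String)
    (hinj : ∀ a ∈ ls, ∀ b ∈ ls, ∀ c ∈ ls, ∀ d ∈ ls, a ++ "," ++ b = c ++ "," ++ d → a = c ∧ b = d) :
    vectorise_trace_alt mt ht ls =
      (pvItems mt (pvTri (PySem.List.dedup ls)), pvItems ht (pvTri (PySem.List.dedup ls))) := by
  unfold vectorise_trace_alt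
  dsimp only
  set D := PySem.List.dedup ls with hDdef
  have hD : D.Nodup := by rw [hDdef, pvDedup_eq_pvDF]; exact pvNodup_pvDF ls []
  have hsub : ∀ x ∈ D, x ∈ ls := by
    intro x hx
    rw [hDdef, pvDedup_eq_pvDF] at hx
    exact ((pvMem_pvDF ls [] x).mp hx).1
  have hpos : PySem.Dict.ofList ((PySem.List.enumerate D).map (fun il => (il.2, il.1))) = pvPos D := rfl
  rw [hpos]
  set ms := pvCanonPairs (pvPos D) mt with hms
  set hs := pvCanonPairs (pvPos D) ht with hhs
  have hndk : ((pvTri D).map (fun pq => pvKey pq.1 pq.2)).Nodup := pvTri_keys_nodup hinj hD hsub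
  have htri := pvB_tri ms hs D D [] (by simp) [] (by simpa using hndk)
  have hcast : ((([] : List String).length : Nat) : Int) = 0 := by simp
  rw [hcast] at htri
  simp only [List.nil_append] at htri
  have hempty : (PySem.Dict.empty, PySem.Dict.empty) =
      ((PySem.Dict.mk (([] : List (String × String)).map (fun pq => (pvKey pq.1 pq.2, if PySem.Set.contains ms pq then (1 : Int) else 0)))),
       (PySem.Dict.mk (([] : List (String × String)).map (fun pq => (pvKey pq.1 pq.2, if PySem.Set.contains hs pq then (1 : Int) else 0))))) := rfl
  rw [hempty]
  rw [htri]
  have hval : ∀ (t : List (List String)),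
      (pvTri D).map (fun pq => (pvKey pq.1 pq.2, if PySem.Set.contains (pvCanonPairs (pvPos D) t) pq then (1 : Int) else 0)) =
      pvItems t (pvTri D) := by
    intro t
    apply List.map_congr_left
    intro pq hpq
    obtain ⟨h1, h2, h3⟩ := pvTri_mem hD pq hpq
    have hiff : (PySem.Set.contains (pvCanonPairs (pvPos D) t) pq = true) ↔
        ([pq.1, pq.2] ∈ t ∨ [pq.2, pq.1] ∈ t) := by
      rw [show PySem.Set.contains (pvCanonPairs (pvPos D) t) pq = List.contains (pvCanonPairs (pvPos D) t) pq from rfl]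
      rw [List.contains_iff_mem]
      exact (show ((pq.1, pq.2) : String × String) = pq from rfl) ▸ pvMem_canonPairs D hD t h1 h2 h3
    by_cases hm : [pq.1, pq.2] ∈ t ∨ [pq.2, pq.1] ∈ t
    · rw [if_pos (hiff.mpr hm)]
      simp [pvMark, hm]
    · rw [if_neg (fun hc => hm (hiff.mp hc))]
      simp [pvMark, hm]
  dsimp only
  rw [hms, hhs, hval mt, hval ht]

-- ===== VERDICT (by name: the statement is the Claim_ definition above) =====
theorem vectorise_trace_spec : Claim_equal_vectorise_trace := by
  intro machine_trace human_trace labels _ hpre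
  unfold Pre_vectorise_trace at hpre
  unfold Spec_vectorise_trace
  rw [pvA_result machine_trace human_trace labels hpre,
      pvB_result machine_trace human_trace labels hpre]
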